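-- pv_equiv track=rewrite | github.com/CreepySenseiCode/Nexa | app/views/client_view.py | _capitaliser_prenom
-- ===== SOURCE A (Python) =====
-- def _capitaliser_prenom(texte: str) -> str:
--     """Capitalise correctement un prenom (gere les tirets et espaces).
--
--     Exemples:
--         "jean-pierre" -> "Jean-Pierre"
--         "marie anne"  -> "Marie Anne"
--     """
--     if not texte:
--         return texte
--     # Traiter les parties separees par des espaces
--     parties_espace = texte.split(' ')
--     resultats = []
--     for partie in parties_espace:
--         # Traiter les parties separees par des tirets
--         sous_parties = partie.split('-')
--         partie_formatee = '-'.join(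
--             sp.capitalize() for sp in sous_parties
--         )
--         resultats.append(partie_formatee)
--     return ' '.join(resultats)
-- ===== SOURCE B (Python) =====
-- def _capitaliser_prenom(texte: str) -> str:
--     """Single pass over the characters: a separator (space or hyphen) is copied and
--     restarts a word; the first letter of each word is uppercased, the rest
--     lowercased."""
--     out = []
--     debut_mot = True
--     for ch in texte:
--         if ch == ' ' or ch == '-':
--             out.append(ch)
--             debut_mot = True
--         elif debut_mot:
--             out.append(ch.upper())
--             debut_mot = False
--         else:
--             out.append(ch.lower())
--     return ''.join(out)
-- ===== Notes on version B (the rewrite author's own statement) =====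
-- stated objective: simpler
-- what changed: Replaces the nested space-split / hyphen-split / join passes with one linear scan over the characters carrying a word-start flag, copying separators verbatim and uppercasing the first letter of each run.
import Mathlib
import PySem

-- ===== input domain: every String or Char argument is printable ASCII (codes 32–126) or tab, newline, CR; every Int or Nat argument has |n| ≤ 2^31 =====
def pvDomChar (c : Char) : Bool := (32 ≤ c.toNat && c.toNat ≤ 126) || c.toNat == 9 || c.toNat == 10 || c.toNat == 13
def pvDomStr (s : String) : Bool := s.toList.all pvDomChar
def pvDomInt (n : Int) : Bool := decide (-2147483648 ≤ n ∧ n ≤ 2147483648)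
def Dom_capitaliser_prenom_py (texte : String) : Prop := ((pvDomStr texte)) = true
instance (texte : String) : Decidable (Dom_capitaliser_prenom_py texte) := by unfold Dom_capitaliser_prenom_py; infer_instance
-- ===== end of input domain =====

-- B replaces A's nested space-split / hyphen-split / join passes by one linear scan with a
-- word-start flag (objective: simpler).

-- ===== PORT A =====
-- hand port of str.capitalize(): first char uppercased, rest lowercased — exact on ASCII
def pyCapitalize (cs : List Char) : List Char :=
  match cs with
  | [] => []
  | c :: rest => PySem.Chars.upperChar c :: PySem.Chars.lower rest

def capitaliser_prenom_py (texte : String) : String :=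
  if texte = "" then texte
  else
    let parties_espace := PySem.Chars.splitOn texte.toList [' ']
    let resultats := parties_espace.map (fun partie =>
      let sous_parties := PySem.Chars.splitOn partie ['-']
      PySem.Chars.join ['-'] (sous_parties.map pyCapitalize))
    String.ofList (PySem.Chars.join [' '] resultats)

-- ===== PORT B =====
-- loop body: out.append(...) and the debut_mot flag, as a fold over the characters
def altStep (st : List Char × Bool) (ch : Char) : List Char × Bool :=
  if ch = ' ' ∨ ch = '-' then (st.1 ++ [ch], true)
  else if st.2 then (st.1 ++ [PySem.Chars.upperChar ch], false)
  else (st.1 ++ [PySem.Chars.lowerChar ch], false)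

def capitaliser_prenom_py_alt (texte : String) : String :=
  String.ofList (texte.toList.foldl altStep ([], true)).1

-- ===== PRECONDITION & SPEC =====
def Spec_capitaliser_prenom_py (texte : String) (out : String) : Prop := out = capitaliser_prenom_py_alt texte
instance (texte : String) (out : String) : Decidable (Spec_capitaliser_prenom_py texte out) := by unfold Spec_capitaliser_prenom_py; infer_instance

-- ===== CLAIM (what is proved, stated in full; the proofs are below) =====
def Claim_equal_capitaliser_prenom_py : Prop := ∀ (texte : String), Dom_capitaliser_prenom_py texte → Spec_capitaliser_prenom_py texte (capitaliser_prenom_py texte)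

-- ===== LEMMAS AND PROOFS =====

-- structural characterisation of Python's split on a single-character separator
def sp (d : Char) : List Char → List Char × List (List Char)
  | [] => ([], [])
  | c :: cs =>
    let r := sp d cs
    if c = d then ([], r.1 :: r.2) else (c :: r.1, r.2)

theorem go_spec (d : Char) (l : List Char) : ∀ (fuel : Nat) (cur : List Char) (acc : List (List Char)),
    l.length < fuel →
    PySem.Chars.splitOn.go [d] fuel l cur acc
      = acc.reverse ++ (cur.reverse ++ (sp d l).1) :: (sp d l).2 := by
  induction l with
  | nil =>
    intro fuel cur acc h
    match fuel with
    | fuel + 1 => simp [PySem.Chars.splitOn.go, sp]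
  | cons c rest ih =>
    intro fuel cur acc h
    match fuel with
    | fuel + 1 =>
      rw [PySem.Chars.splitOn.go]
      have hpre : List.isPrefixOf [d] (c :: rest) = (d == c) := by
        simp [List.isPrefixOf]
      by_cases hc : c = d
      · subst hc
        rw [hpre]
        simp only [BEq.rfl, if_pos]
        rw [show List.drop [c].length (c :: rest) = rest from rfl]
        rw [ih fuel [] ((cur.reverse) :: acc) (by simpa using Nat.lt_of_succ_lt_succ h)]
        simp [sp]
      · rw [hpre]
        have : (d == c) = false := by simp; exact fun hh => hc hh.symm
        rw [this]
        simp only [Bool.false_eq_true, if_neg, not_false_iff]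
        rw [ih fuel (c :: cur) acc (by simpa using Nat.lt_of_succ_lt_succ h)]
        simp [sp, hc]

theorem splitOn_single (d : Char) (cs : List Char) :
    PySem.Chars.splitOn cs [d] = (sp d cs).1 :: (sp d cs).2 := by
  unfold PySem.Chars.splitOn
  rw [go_spec] <;> simp

theorem join_cons_head (sep x : List Char) (l : List Char) (ps : List (List Char)) :
    PySem.Chars.join sep ((x ++ l) :: ps) = x ++ PySem.Chars.join sep (l :: ps) := by
  cases ps with
  | nil => simp [PySem.Chars.join_singleton]
  | cons q qs => simp [PySem.Chars.join_cons_cons]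

-- the per-space-part function of A, and its variant once the word head was consumed
def gfun (p : List Char) : List Char :=
  PySem.Chars.join ['-'] ((PySem.Chars.splitOn p ['-']).map pyCapitalize)

def glow (p : List Char) : List Char :=
  PySem.Chars.join ['-'] (PySem.Chars.lower (sp '-' p).1 :: ((sp '-' p).2).map pyCapitalize)

def A0 (cs : List Char) : List Char :=
  PySem.Chars.join [' '] ((PySem.Chars.splitOn cs [' ']).map gfun)

def Alow (cs : List Char) : List Char :=
  PySem.Chars.join [' '] (glow (sp ' ' cs).1 :: ((sp ' ' cs).2).map gfun)

-- single-pass view of B, and the fold–walk bridge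
def walk : List Char → Bool → List Char
  | [], _ => []
  | c :: cs, st =>
    if c = ' ' ∨ c = '-' then c :: walk cs true
    else (if st then PySem.Chars.upperChar c else PySem.Chars.lowerChar c) :: walk cs false

theorem foldl_altStep (cs : List Char) : ∀ (out : List Char) (st : Bool),
    (cs.foldl altStep (out, st)).1 = out ++ walk cs st := by
  induction cs with
  | nil => intro out st; simp [walk]
  | cons c rest ih =>
    intro out st
    by_cases h : c = ' ' ∨ c = '-'
    · simp [altStep, walk, h, ih]
    · cases st <;> simp [altStep, walk, h, ih]

theorem gfun_nil : gfun [] = [] := by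
  simp [gfun, splitOn_single, sp, pyCapitalize, PySem.Chars.join_singleton]

theorem glow_nil : glow [] = [] := by
  simp [glow, sp, PySem.Chars.lower, PySem.Chars.join_singleton]

theorem gfun_cons_dash (p : List Char) : gfun ('-' :: p) = '-' :: gfun p := by
  simp only [gfun, splitOn_single, sp, reduceIte, List.map_cons, pyCapitalize]
  rw [PySem.Chars.join_cons_cons]
  rfl

theorem gfun_cons_other (c : Char) (p : List Char) (h : c ≠ '-') :
    gfun (c :: p) = PySem.Chars.upperChar c :: glow p := by
  simp only [gfun, splitOn_single, sp, if_neg h, List.map_cons, pyCapitalize]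
  have := join_cons_head ['-'] [PySem.Chars.upperChar c] (PySem.Chars.lower (sp '-' p).1)
      (((sp '-' p).2).map pyCapitalize)
  simpa [glow] using this

theorem glow_cons_dash (p : List Char) : glow ('-' :: p) = '-' :: gfun p := by
  simp only [glow, sp, reduceIte, PySem.Chars.lower, List.map_nil, List.map_cons]
  rw [PySem.Chars.join_cons_cons]
  simp [gfun, splitOn_single]

theorem glow_cons_other (c : Char) (p : List Char) (h : c ≠ '-') :
    glow (c :: p) = PySem.Chars.lowerChar c :: glow p := by
  simp only [glow, sp, if_neg h, PySem.Chars.lower, List.map_cons]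
  have := join_cons_head ['-'] [PySem.Chars.lowerChar c] ((sp '-' p).1.map PySem.Chars.lowerChar)
      (((sp '-' p).2).map pyCapitalize)
  simpa [glow, PySem.Chars.lower] using this

theorem A0_eq_join_sp (cs : List Char) :
    A0 cs = PySem.Chars.join [' '] (gfun (sp ' ' cs).1 :: ((sp ' ' cs).2).map gfun) := by
  simp [A0, splitOn_single]

theorem main_walk (cs : List Char) : A0 cs = walk cs true ∧ Alow cs = walk cs false := by
  induction cs with
  | nil =>
    constructor
    · simp [A0, splitOn_single, sp, gfun_nil, PySem.Chars.join_singleton, walk]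
    · simp [Alow, sp, glow_nil, PySem.Chars.join_singleton, walk]
  | cons c rest ih =>
    obtain ⟨ih1, ih2⟩ := ih
    by_cases hsp : c = ' '
    · subst hsp
      constructor
      · rw [A0_eq_join_sp]
        simp only [sp, reduceIte, gfun_nil, List.map_cons]
        rw [PySem.Chars.join_cons_cons]
        rw [walk]
        simp [← A0_eq_join_sp, ih1]
      · rw [Alow]
        simp only [sp, reduceIte, glow_nil, List.map_cons]
        rw [PySem.Chars.join_cons_cons]
        rw [walk]
        simp [← A0_eq_join_sp, ih1]
    · by_cases hda : c = '-'
      · subst hda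
        constructor
        · rw [A0_eq_join_sp]
          simp only [sp, if_neg hsp, gfun_cons_dash]
          rw [show ('-' :: gfun (sp ' ' rest).1) = ['-'] ++ gfun (sp ' ' rest).1 from rfl,
            join_cons_head, walk]
          simp [← A0_eq_join_sp, ih1]
        · rw [Alow]
          simp only [sp, if_neg hsp, glow_cons_dash]
          rw [show ('-' :: gfun (sp ' ' rest).1) = ['-'] ++ gfun (sp ' ' rest).1 from rfl,
            join_cons_head, walk]
          simp [← A0_eq_join_sp, ih1]
      · have hor : ¬ (c = ' ' ∨ c = '-') := by tauto
        constructor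
        · rw [A0_eq_join_sp]
          simp only [sp, if_neg hsp, gfun_cons_other c _ hda]
          rw [show (PySem.Chars.upperChar c :: glow (sp ' ' rest).1)
              = [PySem.Chars.upperChar c] ++ glow (sp ' ' rest).1 from rfl,
            join_cons_head, walk]
          simp only [if_neg hor, if_pos rfl]
          simp [Alow] at ih2
          simp [ih2]
        · rw [Alow]
          simp only [sp, if_neg hsp, glow_cons_other c _ hda]
          rw [show (PySem.Chars.lowerChar c :: glow (sp ' ' rest).1)
              = [PySem.Chars.lowerChar c] ++ glow (sp ' ' rest).1 from rfl,
            join_cons_head, walk]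
          simp only [if_neg hor]
          simp [Alow] at ih2
          simp [ih2]

-- ===== VERDICT (by name: the statement is the Claim_ definition above) =====
theorem capitaliser_prenom_py_spec : Claim_equal_capitaliser_prenom_py := by
  intro texte _
  unfold Spec_capitaliser_prenom_py capitaliser_prenom_py capitaliser_prenom_py_alt
  rw [foldl_altStep]
  by_cases h : texte = ""
  · subst h; rfl
  · simp only [if_neg h, List.nil_append]
    have hg : (fun partie => PySem.Chars.join ['-'] (List.map pyCapitalize (PySem.Chars.splitOn partie ['-']))) = gfun := rfl
    rw [hg]
    have hm := (main_walk texte.toList).1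
    simp only [A0] at hm
    rw [hm]
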